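-- pv_equiv track=rewrite | github.com/portkeyss/coding-buster | 0484-find-permutation/0484-find-permutation.py | findPermutation
-- ===== SOURCE A (Python) =====
-- from typing import List
--
-- def findPermutation(s: str) -> List[int]:
--     res = []
--     stack = []
--     for k,c in enumerate(s):
--         if c=="I":
--             res.append(k+1)
--             while stack:
--                 res.append(stack.pop())
--         else:
--             stack.append(k+1)
--     res.append(len(s)+1)
--     while stack:
--         res.append(stack.pop())
--     return res
-- ===== SOURCE B (Python) =====
-- def findPermutation(s: str):
--     res = []
--     cs = s
--     k = 0
--     while True:
--         m = 0
--         while m < len(cs) and cs[m] != 'I':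
--             m += 1
--         res.extend(range(k + m + 1, k, -1))
--         if m < len(cs):
--             cs = cs[m + 1:]
--             k += m + 1
--         else:
--             return res
-- ===== Notes on version B (the rewrite author's own statement) =====
-- stated objective: simpler
-- what changed: Replaces A's pending-number stack and per-character enumerate loop by a scan over maximal runs of non-'I' characters that emits each descending block range(k+m+1, k, -1) directly.
import Mathlib
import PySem

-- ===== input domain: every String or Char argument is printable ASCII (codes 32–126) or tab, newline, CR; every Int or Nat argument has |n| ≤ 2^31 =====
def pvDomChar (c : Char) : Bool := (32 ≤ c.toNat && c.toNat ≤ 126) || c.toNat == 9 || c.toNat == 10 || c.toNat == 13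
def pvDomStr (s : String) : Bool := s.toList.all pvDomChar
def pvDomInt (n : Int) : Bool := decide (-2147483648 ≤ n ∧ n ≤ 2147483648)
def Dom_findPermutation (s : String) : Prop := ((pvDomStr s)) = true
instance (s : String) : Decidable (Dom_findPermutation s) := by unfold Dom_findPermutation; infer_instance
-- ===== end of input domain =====

-- B replaces A's pending-D stack by a single scan over maximal non-'I' runs that emits each
-- descending block range(k+m+1, k, -1) directly (objective: simpler, same O(n) cost).

-- ===== PORT A =====
-- 'while stack: res.append(stack.pop())': stack is kept top-first (push = cons), popping all
-- appends the elements one by one in stack order.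
def popAll (res : List Int) (stack : List Int) : List Int :=
  match stack with
  | [] => res
  | x :: st => popAll (res ++ [x]) st

-- the body of 'for k,c in enumerate(s)'
def stepA (acc : List Int × List Int) (kc : Int × Char) : List Int × List Int :=
  if kc.2 = 'I' then (popAll (acc.1 ++ [kc.1 + 1]) acc.2, [])
  else (acc.1, (kc.1 + 1) :: acc.2)

def findPermutation (s : String) : List Int :=
  let p := (PySem.List.enumerate s.toList).foldl stepA ([], [])
  popAll (p.1 ++ [(s.toList.length : Int) + 1]) p.2

-- ===== PORT B =====
-- inner while: length of the leading run of characters ≠ 'I'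
def leadD : List Char → Nat
  | [] => 0
  | c :: cs => if c = 'I' then 0 else leadD cs + 1

-- outer 'while True' loop of Source B
def bGo (cs : List Char) (k : Int) : List Int :=
  let m := leadD cs
  let seg := PySem.List.pyRange (k + m + 1) k (-1)
  if _h : m < cs.length then seg ++ bGo (cs.drop (m + 1)) (k + m + 1) else seg
termination_by cs.length
decreasing_by simp; omega

def findPermutation_alt (s : String) : List Int := bGo s.toList 0

-- ===== PRECONDITION & SPEC =====
def Spec_findPermutation (s : String) (out : List Int) : Prop := out = findPermutation_alt s
instance (s : String) (out : List Int) : Decidable (Spec_findPermutation s out) := by unfold Spec_findPermutation; infer_instance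

-- ===== CLAIM (what is proved, stated in full; the proofs are below) =====
def Claim_equal_findPermutation : Prop := ∀ (s : String), Dom_findPermutation s → Spec_findPermutation s (findPermutation s)

-- ===== LEMMAS AND PROOFS =====

-- common characterisation: remaining chars cs, next index i, t pending D's
def specGo : List Char → Int → Nat → List Int
  | [], i, t => PySem.List.pyRange (i + 1) (i - t) (-1)
  | c :: cs, i, t =>
      if c = 'I' then PySem.List.pyRange (i + 1) (i - t) (-1) ++ specGo cs (i + 1) 0
      else specGo cs (i + 1) (t + 1)

-- A's stack after t consecutive D's ending at index i (top first)
def dstack : Nat → Int → List Int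
  | 0, _ => []
  | t + 1, i => i :: dstack t (i - 1)

theorem popAll_dstack : ∀ (t : Nat) (i : Int) (res : List Int),
    popAll res (dstack t i) = res ++ PySem.List.pyRange i (i - t) (-1) := by
  intro t
  induction t with
  | zero =>
      intro i res
      simp [dstack, popAll, PySem.List.pyRange_neg_one_eq_nil (le_refl i)]
  | succ t ih =>
      intro i res
      have hcons : PySem.List.pyRange i (i - (t + 1 : Nat)) (-1)
          = i :: PySem.List.pyRange (i - 1) (i - (t + 1 : Nat)) (-1) := by
        apply PySem.List.pyRange_neg_one_cons; push_cast; omega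
      have h2 : (i - 1) - (t : Int) = i - ((t + 1 : Nat) : Int) := by push_cast; omega
      simp only [dstack, popAll, ih, hcons, h2]
      simp

theorem loopA : ∀ (cs : List Char) (i : Int) (t : Nat) (res : List Int),
    popAll ((((PySem.List.enumerate cs i).foldl stepA (res, dstack t i)).1)
        ++ [i + cs.length + 1])
      ((PySem.List.enumerate cs i).foldl stepA (res, dstack t i)).2
    = res ++ specGo cs i t := by
  intro cs
  induction cs with
  | nil =>
      intro i t res
      have hcons : PySem.List.pyRange (i + 1) (i - t) (-1)
          = (i + 1) :: PySem.List.pyRange i (i - t) (-1) := by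
        have := PySem.List.pyRange_neg_one_cons (a := i + 1) (b := i - t) (by omega)
        simpa using this
      simp [PySem.List.enumerate_nil, popAll_dstack, specGo, hcons]
  | cons c cs ih =>
      intro i t res
      rw [PySem.List.enumerate_cons]
      by_cases hc : c = 'I'
      · have hstep : stepA (res, dstack t i) (i, c)
            = (res ++ PySem.List.pyRange (i + 1) (i - t) (-1), dstack 0 (i + 1)) := by
          have hcons : PySem.List.pyRange (i + 1) (i - t) (-1)
              = (i + 1) :: PySem.List.pyRange i (i - t) (-1) := by
            have := PySem.List.pyRange_neg_one_cons (a := i + 1) (b := i - t) (by omega)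
            simpa using this
          simp [stepA, hc, popAll_dstack, dstack, hcons]
        subst hc
        have hlen : i + ((('I' :: cs).length : Int)) + 1 = (i + 1) + (cs.length : Int) + 1 := by
          simp only [List.length_cons]; push_cast; ring
        simp only [List.foldl_cons, hstep]
        rw [hlen, ih]
        simp [specGo]
      · have hstep : stepA (res, dstack t i) (i, c) = (res, dstack (t + 1) (i + 1)) := by
          simp [stepA, hc, dstack]
        have hlen : i + (((c :: cs).length : Int)) + 1 = (i + 1) + (cs.length : Int) + 1 := by
          simp only [List.length_cons]; push_cast; ring
        simp only [List.foldl_cons, hstep]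
        rw [hlen, ih]
        simp [specGo, hc]

theorem specGo_lead : ∀ (cs : List Char) (i : Int) (t : Nat),
    specGo cs i t = PySem.List.pyRange (i + leadD cs + 1) (i - t) (-1)
      ++ (if leadD cs < cs.length then specGo (cs.drop (leadD cs + 1)) (i + leadD cs + 1) 0
          else []) := by
  intro cs
  induction cs with
  | nil => intro i t; simp [specGo, leadD]
  | cons c cs ih =>
      intro i t
      by_cases hc : c = 'I'
      · simp [specGo, leadD, hc]
      · have h1 : leadD (c :: cs) = leadD cs + 1 := by simp [leadD, hc]
        have h2 : i + 1 + (leadD cs : Int) + 1 = i + (leadD (c :: cs) : Int) + 1 := by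
          rw [h1]; push_cast; omega
        have h3 : i + 1 - ((t : Int) + 1) = i - t := by omega
        have h4 : leadD cs < cs.length ↔ leadD (c :: cs) < (c :: cs).length := by
          rw [h1]; simp
        have h5 : cs.drop (leadD cs + 1) = (c :: cs).drop (leadD (c :: cs) + 1) := by
          rw [h1]; rfl
        rw [specGo, if_neg hc, ih]
        push_cast
        rw [h3]
        rw [show i + 1 + (leadD cs : Int) + 1 = i + (leadD (c :: cs) : Int) + 1 from h2, h5]
        by_cases h : leadD cs < cs.length
        · rw [if_pos h, if_pos (h4.mp h)]
        · rw [if_neg h, if_neg (fun hh => h (h4.mpr hh))]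

theorem bGo_eq_specGo (cs : List Char) (k : Int) : bGo cs k = specGo cs k 0 := by
  rw [bGo, specGo_lead]
  by_cases h : leadD cs < cs.length
  · rw [dif_pos h, if_pos h, bGo_eq_specGo (cs.drop (leadD cs + 1)) (k + leadD cs + 1)]
    simp
  · rw [dif_neg h, if_neg h]
    simp
termination_by cs.length
decreasing_by simp; omega

-- ===== VERDICT (by name: the statement is the Claim_ definition above) =====
theorem findPermutation_spec : Claim_equal_findPermutation := by
  intro s _
  show findPermutation s = findPermutation_alt s
  have h := loopA s.toList 0 0 []
  simp only [dstack] at h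
  unfold findPermutation findPermutation_alt
  rw [bGo_eq_specGo]
  simpa using h
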